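-- pv_equiv track=rewrite | github.com/JeonggonCho/Algorithm | 프로그래머스/unrated/181916. 주사위 게임 3/주사위 게임 3.py | solution
-- ===== SOURCE A (Python) =====
-- def solution(a, b, c, d):
--     answer = 0
--     dic = {}
--     dice_list = [a, b, c, d]
--     for i in dice_list:
--         if i not in dic:
--             dic[i] = 1
--         else:
--             dic[i] += 1
--     # 모두 같은 값일 경우
--     if len(dic) == 1:
--         p = list(dic.keys())[0]
--         return 1111 * p
--     # 세 개가 같은 값이고 나머지 하나가 다른 값일 경우
--     elif len(dic) == 2 and sorted(list(dic.values())) == [1, 3]: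
--         p = sorted(dic, key=lambda x: dic[x])[1]
--         q = sorted(dic, key=lambda x: dic[x])[0]
--         return (10 * p + q) ** 2
--     # 두 개씩 같은 값일 경우
--     elif len(dic) == 2 and list(dic.values()) == [2, 2]:
--         p = list(dic.keys())[0]
--         q = list(dic.keys())[1]
--         return (p + q) * abs(p - q)
--     # 두 개가 같은 값이고 나머지가 각각 다른 값일 경우
--     elif len(dic) == 3:
--         p = sorted(dic, key=lambda x: dic[x])[1]
--         q = sorted(dic, key=lambda x: dic[x])[0]
--         return p * q
--     # 네 개의 값이 모두 다른 경우
--     elif len(dic) == 4: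
--         return min(sorted(dice_list))
-- ===== SOURCE B (Python) =====
-- def solution(a, b, c, d):
--     s0, s1, s2, s3 = sorted([a, b, c, d])
--     if s0 == s3:
--         return 1111 * s0
--     if s0 == s2:
--         return (10 * s0 + s3) ** 2
--     if s1 == s3:
--         return (10 * s3 + s0) ** 2
--     if s0 == s1 and s2 == s3:
--         return (s0 + s2) * (s2 - s0)
--     if s0 == s1:
--         return s2 * s3
--     if s1 == s2:
--         return s0 * s3
--     if s2 == s3:
--         return s0 * s1
--     return s0
-- ===== Notes on version B (the rewrite author's own statement) =====
-- stated objective: simpler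
-- what changed: Replaces the frequency dict and the count-keyed key sorts by sorting the four dice once and classifying the hand by adjacency of equal values in the sorted quadruple.
import Mathlib
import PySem

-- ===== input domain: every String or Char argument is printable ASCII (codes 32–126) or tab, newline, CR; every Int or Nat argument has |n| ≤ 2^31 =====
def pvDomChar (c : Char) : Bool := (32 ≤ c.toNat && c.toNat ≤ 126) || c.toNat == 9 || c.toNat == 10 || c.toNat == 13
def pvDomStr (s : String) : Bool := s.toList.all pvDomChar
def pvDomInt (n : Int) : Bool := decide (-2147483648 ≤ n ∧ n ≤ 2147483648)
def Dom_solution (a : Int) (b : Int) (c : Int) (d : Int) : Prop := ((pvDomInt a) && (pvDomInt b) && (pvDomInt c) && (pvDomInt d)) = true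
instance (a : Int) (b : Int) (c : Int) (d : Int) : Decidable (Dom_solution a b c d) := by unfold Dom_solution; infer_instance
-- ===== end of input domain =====

-- B replaces A's frequency dict and count-keyed key sorts by sorting the four dice once and
-- classifying by adjacency of equal values in the sorted quadruple (objective: simpler).

-- ===== PORT A =====
-- Literal port of A: build the multiplicity dict over [a,b,c,d], then branch on its size and
-- value multiset exactly as the Python does (sorted(dic, key=...) = PySem.List.sorted over keys).
-- Python's min(...) of the (always non-empty, 4-element) sorted list is (min? ...).getD 0; the
-- default is never used.  The unreachable final branch (no Python else) returns 0.
def solution (a : Int) (b : Int) (c : Int) (d : Int) : Int :=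
  let diceList : List Int := [a, b, c, d]
  let dic : PySem.Dict Int Int := diceList.foldl (fun dic i =>
    if !(dic.contains i) then dic.insert i 1 else dic.insert i (dic.getD i 0 + 1)) PySem.Dict.empty
  if dic.size = 1 then
    1111 * (PySem.List.pyGetD dic.keys 0 0)
  else if dic.size = 2 ∧ PySem.List.sorted dic.values (fun x => x) false = [1, 3] then
    let p := PySem.List.pyGetD (PySem.List.sorted dic.keys (fun x => dic.getD x 0) false) 1 0
    let q := PySem.List.pyGetD (PySem.List.sorted dic.keys (fun x => dic.getD x 0) false) 0 0
    (10 * p + q) ^ 2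
  else if dic.size = 2 ∧ dic.values = [2, 2] then
    let p := PySem.List.pyGetD dic.keys 0 0
    let q := PySem.List.pyGetD dic.keys 1 0
    (p + q) * |p - q|
  else if dic.size = 3 then
    let p := PySem.List.pyGetD (PySem.List.sorted dic.keys (fun x => dic.getD x 0) false) 1 0
    let q := PySem.List.pyGetD (PySem.List.sorted dic.keys (fun x => dic.getD x 0) false) 0 0
    p * q
  else if dic.size = 4 then
    (PySem.List.min? (PySem.List.sorted diceList (fun x => x) false) (fun x => x)).getD 0
  else 0

-- ===== PORT B =====
-- Port of B: sort the four dice, then classify by adjacency.  The sorted list of a 4-element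
-- list always has 4 elements, so the wildcard branch (returning 0) is unreachable.
def solution_alt (a : Int) (b : Int) (c : Int) (d : Int) : Int :=
  match PySem.List.sorted [a, b, c, d] (fun x => x) false with
  | [s0, s1, s2, s3] =>
    if s0 = s3 then 1111 * s0
    else if s0 = s2 then (10 * s0 + s3) ^ 2
    else if s1 = s3 then (10 * s3 + s0) ^ 2
    else if s0 = s1 ∧ s2 = s3 then (s0 + s2) * (s2 - s0)
    else if s0 = s1 then s2 * s3
    else if s1 = s2 then s0 * s3
    else if s2 = s3 then s0 * s1
    else s0
  | _ => 0

-- ===== PRECONDITION & SPEC =====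
def Spec_solution (a : Int) (b : Int) (c : Int) (d : Int) (out : Int) : Prop := out = solution_alt a b c d
instance (a : Int) (b : Int) (c : Int) (d : Int) (out : Int) : Decidable (Spec_solution a b c d out) := by unfold Spec_solution; infer_instance

-- ===== CLAIM (what is proved, stated in full; the proofs are below) =====
def Claim_equal_solution : Prop := ∀ (a : Int) (b : Int) (c : Int) (d : Int), Dom_solution a b c d → Spec_solution a b c d (solution a b c d)

-- ===== LEMMAS AND PROOFS =====
-- One lemma per pattern of equalities among the four dice (and per arrangement, since A feeds
-- the dice into its dict in input order); the all-distinct case is handled structurally.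

lemma E4 (x : Int) : solution x x x x = solution_alt x x x x := by
  simp [solution, solution_alt, PySem.List.sorted, PySem.List.insertBy, PySem.Dict.insert,
      PySem.Dict.contains, PySem.Dict.empty, PySem.Dict.getD, PySem.Dict.get?, PySem.Dict.size,
      PySem.Dict.keys, PySem.Dict.values, PySem.List.pyGetD]

lemma E31a (x y : Int) (h : x ≠ y) :
    solution x x x y = solution_alt x x x y := by
  rcases lt_or_gt_of_ne ‹x ≠ y› with h' | h' <;>
    first
    | (simp [solution, solution_alt, PySem.List.sorted, PySem.List.insertBy, PySem.Dict.insert,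
      PySem.Dict.contains, PySem.Dict.empty, PySem.Dict.getD, PySem.Dict.get?, PySem.Dict.size,
      PySem.Dict.keys, PySem.Dict.values, PySem.List.pyGetD, h', lt_asymm h', h'.ne, h'.ne']; done)
    | (simp [solution, solution_alt, PySem.List.sorted, PySem.List.insertBy, PySem.Dict.insert,
      PySem.Dict.contains, PySem.Dict.empty, PySem.Dict.getD, PySem.Dict.get?, PySem.Dict.size,
      PySem.Dict.keys, PySem.Dict.values, PySem.List.pyGetD, h', lt_asymm h', h'.ne, h'.ne']; ring)
    | (simp [solution, solution_alt, PySem.List.sorted, PySem.List.insertBy, PySem.Dict.insert,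
      PySem.Dict.contains, PySem.Dict.empty, PySem.Dict.getD, PySem.Dict.get?, PySem.Dict.size,
      PySem.Dict.keys, PySem.Dict.values, PySem.List.pyGetD,
      abs_of_nonneg (show (0 : Int) ≤ x - y by omega), h', lt_asymm h', h'.ne, h'.ne']; try ring; try simp; done)
    | (simp [solution, solution_alt, PySem.List.sorted, PySem.List.insertBy, PySem.Dict.insert,
      PySem.Dict.contains, PySem.Dict.empty, PySem.Dict.getD, PySem.Dict.get?, PySem.Dict.size,
      PySem.Dict.keys, PySem.Dict.values, PySem.List.pyGetD,
      abs_of_nonpos (show x - y ≤ (0 : Int) by omega), h', lt_asymm h', h'.ne, h'.ne']; try ring; try simp; done)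

lemma E31b (x y : Int) (h : x ≠ y) :
    solution x x y x = solution_alt x x y x := by
  rcases lt_or_gt_of_ne ‹x ≠ y› with h' | h' <;>
    first
    | (simp [solution, solution_alt, PySem.List.sorted, PySem.List.insertBy, PySem.Dict.insert,
      PySem.Dict.contains, PySem.Dict.empty, PySem.Dict.getD, PySem.Dict.get?, PySem.Dict.size,
      PySem.Dict.keys, PySem.Dict.values, PySem.List.pyGetD, h', lt_asymm h', h'.ne, h'.ne']; done)
    | (simp [solution, solution_alt, PySem.List.sorted, PySem.List.insertBy, PySem.Dict.insert,
      PySem.Dict.contains, PySem.Dict.empty, PySem.Dict.getD, PySem.Dict.get?, PySem.Dict.size,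
      PySem.Dict.keys, PySem.Dict.values, PySem.List.pyGetD, h', lt_asymm h', h'.ne, h'.ne']; ring)
    | (simp [solution, solution_alt, PySem.List.sorted, PySem.List.insertBy, PySem.Dict.insert,
      PySem.Dict.contains, PySem.Dict.empty, PySem.Dict.getD, PySem.Dict.get?, PySem.Dict.size,
      PySem.Dict.keys, PySem.Dict.values, PySem.List.pyGetD,
      abs_of_nonneg (show (0 : Int) ≤ x - y by omega), h', lt_asymm h', h'.ne, h'.ne']; try ring; try simp; done)
    | (simp [solution, solution_alt, PySem.List.sorted, PySem.List.insertBy, PySem.Dict.insert,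
      PySem.Dict.contains, PySem.Dict.empty, PySem.Dict.getD, PySem.Dict.get?, PySem.Dict.size,
      PySem.Dict.keys, PySem.Dict.values, PySem.List.pyGetD,
      abs_of_nonpos (show x - y ≤ (0 : Int) by omega), h', lt_asymm h', h'.ne, h'.ne']; try ring; try simp; done)

lemma E31c (x y : Int) (h : x ≠ y) :
    solution x y x x = solution_alt x y x x := by
  rcases lt_or_gt_of_ne ‹x ≠ y› with h' | h' <;>
    first
    | (simp [solution, solution_alt, PySem.List.sorted, PySem.List.insertBy, PySem.Dict.insert,
      PySem.Dict.contains, PySem.Dict.empty, PySem.Dict.getD, PySem.Dict.get?, PySem.Dict.size,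
      PySem.Dict.keys, PySem.Dict.values, PySem.List.pyGetD, h', lt_asymm h', h'.ne, h'.ne']; done)
    | (simp [solution, solution_alt, PySem.List.sorted, PySem.List.insertBy, PySem.Dict.insert,
      PySem.Dict.contains, PySem.Dict.empty, PySem.Dict.getD, PySem.Dict.get?, PySem.Dict.size,
      PySem.Dict.keys, PySem.Dict.values, PySem.List.pyGetD, h', lt_asymm h', h'.ne, h'.ne']; ring)
    | (simp [solution, solution_alt, PySem.List.sorted, PySem.List.insertBy, PySem.Dict.insert,
      PySem.Dict.contains, PySem.Dict.empty, PySem.Dict.getD, PySem.Dict.get?, PySem.Dict.size,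
      PySem.Dict.keys, PySem.Dict.values, PySem.List.pyGetD,
      abs_of_nonneg (show (0 : Int) ≤ x - y by omega), h', lt_asymm h', h'.ne, h'.ne']; try ring; try simp; done)
    | (simp [solution, solution_alt, PySem.List.sorted, PySem.List.insertBy, PySem.Dict.insert,
      PySem.Dict.contains, PySem.Dict.empty, PySem.Dict.getD, PySem.Dict.get?, PySem.Dict.size,
      PySem.Dict.keys, PySem.Dict.values, PySem.List.pyGetD,
      abs_of_nonpos (show x - y ≤ (0 : Int) by omega), h', lt_asymm h', h'.ne, h'.ne']; try ring; try simp; done)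

lemma E31d (x y : Int) (h : x ≠ y) :
    solution y x x x = solution_alt y x x x := by
  rcases lt_or_gt_of_ne ‹x ≠ y› with h' | h' <;>
    first
    | (simp [solution, solution_alt, PySem.List.sorted, PySem.List.insertBy, PySem.Dict.insert,
      PySem.Dict.contains, PySem.Dict.empty, PySem.Dict.getD, PySem.Dict.get?, PySem.Dict.size,
      PySem.Dict.keys, PySem.Dict.values, PySem.List.pyGetD, h', lt_asymm h', h'.ne, h'.ne']; done)
    | (simp [solution, solution_alt, PySem.List.sorted, PySem.List.insertBy, PySem.Dict.insert,
      PySem.Dict.contains, PySem.Dict.empty, PySem.Dict.getD, PySem.Dict.get?, PySem.Dict.size,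
      PySem.Dict.keys, PySem.Dict.values, PySem.List.pyGetD, h', lt_asymm h', h'.ne, h'.ne']; ring)
    | (simp [solution, solution_alt, PySem.List.sorted, PySem.List.insertBy, PySem.Dict.insert,
      PySem.Dict.contains, PySem.Dict.empty, PySem.Dict.getD, PySem.Dict.get?, PySem.Dict.size,
      PySem.Dict.keys, PySem.Dict.values, PySem.List.pyGetD,
      abs_of_nonneg (show (0 : Int) ≤ x - y by omega), h', lt_asymm h', h'.ne, h'.ne']; try ring; try simp; done)
    | (simp [solution, solution_alt, PySem.List.sorted, PySem.List.insertBy, PySem.Dict.insert,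
      PySem.Dict.contains, PySem.Dict.empty, PySem.Dict.getD, PySem.Dict.get?, PySem.Dict.size,
      PySem.Dict.keys, PySem.Dict.values, PySem.List.pyGetD,
      abs_of_nonpos (show x - y ≤ (0 : Int) by omega), h', lt_asymm h', h'.ne, h'.ne']; try ring; try simp; done)

lemma E22a (x y : Int) (h : x ≠ y) :
    solution x x y y = solution_alt x x y y := by
  rcases lt_or_gt_of_ne h with h' | h'
  · simp [solution, solution_alt, PySem.List.sorted, PySem.List.insertBy, PySem.Dict.insert,
      PySem.Dict.contains, PySem.Dict.empty, PySem.Dict.getD, PySem.Dict.get?, PySem.Dict.size,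
      PySem.Dict.keys, PySem.Dict.values, PySem.List.pyGetD,
      abs_of_nonpos (show x - y ≤ (0 : Int) by omega), h', lt_asymm h', h'.ne, h'.ne']
    try ring
    try simp
  · simp [solution, solution_alt, PySem.List.sorted, PySem.List.insertBy, PySem.Dict.insert,
      PySem.Dict.contains, PySem.Dict.empty, PySem.Dict.getD, PySem.Dict.get?, PySem.Dict.size,
      PySem.Dict.keys, PySem.Dict.values, PySem.List.pyGetD,
      abs_of_nonneg (show (0 : Int) ≤ x - y by omega), h', lt_asymm h', h'.ne, h'.ne']
    try ring
    try simp

lemma E22b (x y : Int) (h : x ≠ y) :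
    solution x y x y = solution_alt x y x y := by
  rcases lt_or_gt_of_ne h with h' | h'
  · simp [solution, solution_alt, PySem.List.sorted, PySem.List.insertBy, PySem.Dict.insert,
      PySem.Dict.contains, PySem.Dict.empty, PySem.Dict.getD, PySem.Dict.get?, PySem.Dict.size,
      PySem.Dict.keys, PySem.Dict.values, PySem.List.pyGetD,
      abs_of_nonpos (show x - y ≤ (0 : Int) by omega), h', lt_asymm h', h'.ne, h'.ne']
    try ring
    try simp
  · simp [solution, solution_alt, PySem.List.sorted, PySem.List.insertBy, PySem.Dict.insert,
      PySem.Dict.contains, PySem.Dict.empty, PySem.Dict.getD, PySem.Dict.get?, PySem.Dict.size,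
      PySem.Dict.keys, PySem.Dict.values, PySem.List.pyGetD,
      abs_of_nonneg (show (0 : Int) ≤ x - y by omega), h', lt_asymm h', h'.ne, h'.ne']
    try ring
    try simp

lemma E22c (x y : Int) (h : x ≠ y) :
    solution x y y x = solution_alt x y y x := by
  rcases lt_or_gt_of_ne h with h' | h'
  · simp [solution, solution_alt, PySem.List.sorted, PySem.List.insertBy, PySem.Dict.insert,
      PySem.Dict.contains, PySem.Dict.empty, PySem.Dict.getD, PySem.Dict.get?, PySem.Dict.size,
      PySem.Dict.keys, PySem.Dict.values, PySem.List.pyGetD,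
      abs_of_nonpos (show x - y ≤ (0 : Int) by omega), h', lt_asymm h', h'.ne, h'.ne']
    try ring
    try simp
  · simp [solution, solution_alt, PySem.List.sorted, PySem.List.insertBy, PySem.Dict.insert,
      PySem.Dict.contains, PySem.Dict.empty, PySem.Dict.getD, PySem.Dict.get?, PySem.Dict.size,
      PySem.Dict.keys, PySem.Dict.values, PySem.List.pyGetD,
      abs_of_nonneg (show (0 : Int) ≤ x - y by omega), h', lt_asymm h', h'.ne, h'.ne']
    try ring
    try simp

lemma E211a (x y z : Int) (hxy : x ≠ y) (hxz : x ≠ z) (hyz : y ≠ z) :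
    solution x x y z = solution_alt x x y z := by
  rcases lt_trichotomy x y with h1 | h1 | h1 <;> rcases lt_trichotomy x z with h2 | h2 | h2 <;>
    rcases lt_trichotomy y z with h3 | h3 | h3 <;>
    first
    | omega
    | (simp [solution, solution_alt, PySem.List.sorted, PySem.List.insertBy, PySem.Dict.insert,
      PySem.Dict.contains, PySem.Dict.empty, PySem.Dict.getD, PySem.Dict.get?, PySem.Dict.size,
      PySem.Dict.keys, PySem.Dict.values, PySem.List.pyGetD, h1, h2, h3, lt_asymm h1, lt_asymm h2, lt_asymm h3,
        h1.ne, h1.ne', h2.ne, h2.ne', h3.ne, h3.ne']; try ring)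

lemma E211b (x y z : Int) (hxy : x ≠ y) (hxz : x ≠ z) (hyz : y ≠ z) :
    solution x y x z = solution_alt x y x z := by
  rcases lt_trichotomy x y with h1 | h1 | h1 <;> rcases lt_trichotomy x z with h2 | h2 | h2 <;>
    rcases lt_trichotomy y z with h3 | h3 | h3 <;>
    first
    | omega
    | (simp [solution, solution_alt, PySem.List.sorted, PySem.List.insertBy, PySem.Dict.insert,
      PySem.Dict.contains, PySem.Dict.empty, PySem.Dict.getD, PySem.Dict.get?, PySem.Dict.size,
      PySem.Dict.keys, PySem.Dict.values, PySem.List.pyGetD, h1, h2, h3, lt_asymm h1, lt_asymm h2, lt_asymm h3,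
        h1.ne, h1.ne', h2.ne, h2.ne', h3.ne, h3.ne']; try ring)

lemma E211c (x y z : Int) (hxy : x ≠ y) (hxz : x ≠ z) (hyz : y ≠ z) :
    solution x y z x = solution_alt x y z x := by
  rcases lt_trichotomy x y with h1 | h1 | h1 <;> rcases lt_trichotomy x z with h2 | h2 | h2 <;>
    rcases lt_trichotomy y z with h3 | h3 | h3 <;>
    first
    | omega
    | (simp [solution, solution_alt, PySem.List.sorted, PySem.List.insertBy, PySem.Dict.insert,
      PySem.Dict.contains, PySem.Dict.empty, PySem.Dict.getD, PySem.Dict.get?, PySem.Dict.size,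
      PySem.Dict.keys, PySem.Dict.values, PySem.List.pyGetD, h1, h2, h3, lt_asymm h1, lt_asymm h2, lt_asymm h3,
        h1.ne, h1.ne', h2.ne, h2.ne', h3.ne, h3.ne']; try ring)

lemma E211d (x y z : Int) (hxy : x ≠ y) (hxz : x ≠ z) (hyz : y ≠ z) :
    solution x y y z = solution_alt x y y z := by
  rcases lt_trichotomy x y with h1 | h1 | h1 <;> rcases lt_trichotomy x z with h2 | h2 | h2 <;>
    rcases lt_trichotomy y z with h3 | h3 | h3 <;>
    first
    | omega
    | (simp [solution, solution_alt, PySem.List.sorted, PySem.List.insertBy, PySem.Dict.insert,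
      PySem.Dict.contains, PySem.Dict.empty, PySem.Dict.getD, PySem.Dict.get?, PySem.Dict.size,
      PySem.Dict.keys, PySem.Dict.values, PySem.List.pyGetD, h1, h2, h3, lt_asymm h1, lt_asymm h2, lt_asymm h3,
        h1.ne, h1.ne', h2.ne, h2.ne', h3.ne, h3.ne']; try ring)

lemma E211e (x y z : Int) (hxy : x ≠ y) (hxz : x ≠ z) (hyz : y ≠ z) :
    solution x y z y = solution_alt x y z y := by
  rcases lt_trichotomy x y with h1 | h1 | h1 <;> rcases lt_trichotomy x z with h2 | h2 | h2 <;>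
    rcases lt_trichotomy y z with h3 | h3 | h3 <;>
    first
    | omega
    | (simp [solution, solution_alt, PySem.List.sorted, PySem.List.insertBy, PySem.Dict.insert,
      PySem.Dict.contains, PySem.Dict.empty, PySem.Dict.getD, PySem.Dict.get?, PySem.Dict.size,
      PySem.Dict.keys, PySem.Dict.values, PySem.List.pyGetD, h1, h2, h3, lt_asymm h1, lt_asymm h2, lt_asymm h3,
        h1.ne, h1.ne', h2.ne, h2.ne', h3.ne, h3.ne']; try ring)

lemma E211f (x y z : Int) (hxy : x ≠ y) (hxz : x ≠ z) (hyz : y ≠ z) :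
    solution x y z z = solution_alt x y z z := by
  rcases lt_trichotomy x y with h1 | h1 | h1 <;> rcases lt_trichotomy x z with h2 | h2 | h2 <;>
    rcases lt_trichotomy y z with h3 | h3 | h3 <;>
    first
    | omega
    | (simp [solution, solution_alt, PySem.List.sorted, PySem.List.insertBy, PySem.Dict.insert,
      PySem.Dict.contains, PySem.Dict.empty, PySem.Dict.getD, PySem.Dict.get?, PySem.Dict.size,
      PySem.Dict.keys, PySem.Dict.values, PySem.List.pyGetD, h1, h2, h3, lt_asymm h1, lt_asymm h2, lt_asymm h3,
        h1.ne, h1.ne', h2.ne, h2.ne', h3.ne, h3.ne']; try ring)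

set_option maxHeartbeats 1000000 in
lemma E1111 (a b c d : Int) (h1 : a ≠ b) (h2 : a ≠ c) (h3 : a ≠ d) (h4 : b ≠ c) (h5 : b ≠ d)
    (h6 : c ≠ d) : solution a b c d = solution_alt a b c d := by
  rcases hEq : PySem.List.sorted [a, b, c, d] (fun x => x) false
    with _ | ⟨s0, _ | ⟨s1, _ | ⟨s2, _ | ⟨s3, _ | ⟨s4, t⟩⟩⟩⟩⟩ <;>
    try (have hl := congrArg List.length hEq
         rw [PySem.List.length_sorted] at hl; simp at hl)
  have hperm : List.Perm [s0, s1, s2, s3] [a, b, c, d] := by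
    rw [← hEq]; exact PySem.List.sorted_perm _ _ _
  have hnd : List.Nodup [s0, s1, s2, s3] := by
    refine hperm.nodup_iff.mpr ?_
    simp [List.nodup_cons, h1, h2, h3, h4, h5, h6]
  have hpw : List.Pairwise (fun u v : Int => u ≤ v) [s0, s1, s2, s3] := by
    have := PySem.List.sorted_pairwise [a, b, c, d] (fun x : Int => x) ; rw [hEq] at this
    exact this
  simp [List.nodup_cons] at hnd
  simp [List.pairwise_cons] at hpw
  have hA : solution a b c d = s0 := by
    simp [solution, PySem.Dict.insert,
      PySem.Dict.contains, PySem.Dict.empty, PySem.Dict.getD, PySem.Dict.get?, PySem.Dict.size,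
      PySem.Dict.keys, PySem.Dict.values, PySem.List.pyGetD, h1, h2, h3, h4, h5, h6,
      h1.symm, h2.symm, h3.symm, h4.symm, h5.symm, h6.symm]
    rw [hEq, PySem.List.min?_id_cons]
    simp [List.foldl]
    omega
  have hB : solution_alt a b c d = s0 := by
    simp only [solution_alt, hEq]
    simp [hnd.1.1, hnd.1.2.1, hnd.1.2.2, hnd.2.1.1, hnd.2.1.2, hnd.2.2]
  rw [hA, hB]

-- ===== VERDICT (by name: the statement is the Claim_ definition above) =====
theorem solution_spec : Claim_equal_solution := by
  intro a b c d _
  unfold Spec_solution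
  by_cases h1 : a = b
  · by_cases h2 : a = c
    · by_cases h3 : a = d
      · by_cases h4 : b = c
        · by_cases h5 : b = d
          · by_cases h6 : c = d
            · subst_vars
              exact E4 _
            · subst_vars
              omega
          · by_cases h6 : c = d
            · subst_vars
              omega
            · subst_vars
              omega
        · by_cases h5 : b = d
          · by_cases h6 : c = d
            · subst_vars
              omega
            · subst_vars
              omega
          · by_cases h6 : c = d
            · subst_vars
              omega
            · subst_vars
              omega
      · by_cases h4 : b = c
        · by_cases h5 : b = d
          · by_cases h6 : c = d
            · subst_vars
              omega
            · subst_vars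
              omega
          · by_cases h6 : c = d
            · subst_vars
              omega
            · subst_vars
              exact E31a _ _ (by omega)
        · by_cases h5 : b = d
          · by_cases h6 : c = d
            · subst_vars
              omega
            · subst_vars
              omega
          · by_cases h6 : c = d
            · subst_vars
              omega
            · subst_vars
              omega
    · by_cases h3 : a = d
      · by_cases h4 : b = c
        · by_cases h5 : b = d
          · by_cases h6 : c = d
            · subst_vars
              omega
            · subst_vars
              omega
          · by_cases h6 : c = d
            · subst_vars
              omega
            · subst_vars
              omega
        · by_cases h5 : b = d
          · by_cases h6 : c = d
            · subst_vars
              omega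
            · subst_vars
              exact E31b _ _ (by omega)
          · by_cases h6 : c = d
            · subst_vars
              omega
            · subst_vars
              omega
      · by_cases h4 : b = c
        · by_cases h5 : b = d
          · by_cases h6 : c = d
            · subst_vars
              omega
            · subst_vars
              omega
          · by_cases h6 : c = d
            · subst_vars
              omega
            · subst_vars
              omega
        · by_cases h5 : b = d
          · by_cases h6 : c = d
            · subst_vars
              omega
            · subst_vars
              omega
          · by_cases h6 : c = d
            · subst_vars
              exact E22a _ _ (by omega)
            · subst_vars
              exact E211a _ _ _ (by omega) (by omega) (by omega)
  · by_cases h2 : a = c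
    · by_cases h3 : a = d
      · by_cases h4 : b = c
        · by_cases h5 : b = d
          · by_cases h6 : c = d
            · subst_vars
              omega
            · subst_vars
              omega
          · by_cases h6 : c = d
            · subst_vars
              omega
            · subst_vars
              omega
        · by_cases h5 : b = d
          · by_cases h6 : c = d
            · subst_vars
              omega
            · subst_vars
              omega
          · by_cases h6 : c = d
            · subst_vars
              exact E31c _ _ (by omega)
            · subst_vars
              omega
      · by_cases h4 : b = c
        · by_cases h5 : b = d
          · by_cases h6 : c = d
            · subst_vars
              omega
            · subst_vars
              omega
          · by_cases h6 : c = d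
            · subst_vars
              omega
            · subst_vars
              omega
        · by_cases h5 : b = d
          · by_cases h6 : c = d
            · subst_vars
              omega
            · subst_vars
              exact E22b _ _ (by omega)
          · by_cases h6 : c = d
            · subst_vars
              omega
            · subst_vars
              exact E211b _ _ _ (by omega) (by omega) (by omega)
    · by_cases h3 : a = d
      · by_cases h4 : b = c
        · by_cases h5 : b = d
          · by_cases h6 : c = d
            · subst_vars
              omega
            · subst_vars
              omega
          · by_cases h6 : c = d
            · subst_vars
              omega
            · subst_vars
              exact E22c _ _ (by omega)
        · by_cases h5 : b = d
          · by_cases h6 : c = d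
            · subst_vars
              omega
            · subst_vars
              omega
          · by_cases h6 : c = d
            · subst_vars
              omega
            · subst_vars
              exact E211c _ _ _ (by omega) (by omega) (by omega)
      · by_cases h4 : b = c
        · by_cases h5 : b = d
          · by_cases h6 : c = d
            · subst_vars
              exact E31d _ _ (by omega)
            · subst_vars
              omega
          · by_cases h6 : c = d
            · subst_vars
              omega
            · subst_vars
              exact E211d _ _ _ (by omega) (by omega) (by omega)
        · by_cases h5 : b = d
          · by_cases h6 : c = d
            · subst_vars
              omega
            · subst_vars
              exact E211e _ _ _ (by omega) (by omega) (by omega)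
          · by_cases h6 : c = d
            · subst_vars
              exact E211f _ _ _ (by omega) (by omega) (by omega)
            · subst_vars
              exact E1111 _ _ _ _ (by omega) (by omega) (by omega) (by omega) (by omega) (by omega)
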